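-- pv_equiv track=rewrite | github.com/Aaka702/HackerRank-LeetCode-HackerEarth- | Bob Playlist.py | count_favourite_singers
-- ===== SOURCE A (Python) =====
-- def count_favourite_singers(num_songs, playlist):
--     singer_counts = {}
--     max_count = 0
--
--     # Count the occurrences of each singer
--     for singer in playlist:
--         singer_counts[singer] = singer_counts.get(singer, 0) + 1
--         max_count = max(max_count, singer_counts[singer])
--
--     # Count the number of favourite singers
--     favourite_singers_count = sum(1 for count in singer_counts.values() if count == max_count)
--
--     return favourite_singers_count
-- ===== SOURCE B (Python) =====
-- def count_favourite_singers(num_songs, playlist):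
--     # Sort a copy, then scan consecutive runs of equal singers, tracking the
--     # longest run length seen and how many runs tie for that length.
--     ordered = sorted(playlist)
--     n = len(ordered)
--     best = 0
--     ties = 0
--     i = 0
--     while i < n:
--         j = i + 1
--         while j < n and ordered[j] == ordered[i]:
--             j += 1
--         run = j - i
--         if run > best:
--             best, ties = run, 1
--         elif run == best:
--             ties += 1
--         i = j
--     return ties
-- ===== Notes on version B (the rewrite author's own statement) =====
-- stated objective: alternative
-- what changed: B replaces A's hash-table frequency count with a running maximum by a sort-then-scan: it sorts a copy of the playlist and walks the consecutive runs of equal singers once, keeping the longest run length and the number of runs tying for it.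
import Mathlib
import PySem

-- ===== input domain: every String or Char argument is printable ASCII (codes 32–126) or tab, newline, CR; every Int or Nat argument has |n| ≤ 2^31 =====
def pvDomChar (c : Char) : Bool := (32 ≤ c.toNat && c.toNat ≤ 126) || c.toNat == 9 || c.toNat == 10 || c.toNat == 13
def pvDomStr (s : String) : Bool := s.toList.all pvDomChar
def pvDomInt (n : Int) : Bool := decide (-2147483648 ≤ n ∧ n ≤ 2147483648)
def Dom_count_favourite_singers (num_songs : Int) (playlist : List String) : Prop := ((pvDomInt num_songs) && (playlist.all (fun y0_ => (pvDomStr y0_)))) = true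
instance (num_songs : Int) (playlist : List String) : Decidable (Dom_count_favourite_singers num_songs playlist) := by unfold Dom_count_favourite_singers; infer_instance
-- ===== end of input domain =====

-- B replaces A's hash-table counting (with a running max) by sort-then-scan over
-- consecutive runs of equal singers; alternative decomposition, not faster.

-- ===== PORT A =====
def count_favourite_singers (num_songs : Int) (playlist : List String) : Int :=
  let st := playlist.foldl
    (fun (p : PySem.Dict String Int × Int) singer =>
      let c := p.1.getD singer 0 + 1
      (p.1.insert singer c, max p.2 c))
    (PySem.Dict.empty, 0)
  ((st.1.values.map (fun count => if count == st.2 then (1 : Int) else 0)).sum)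

-- ===== PORT B =====
-- inner while loop 'j = i+1; while j < n and ordered[j] == ordered[i]: j += 1':
-- on the suffix starting at i+1, count the leading elements equal to ordered[i]
-- and return the remainder (i.e. j - i - 1 and the suffix from j).
def pvRunSplit (h : String) : List String → Nat × List String
  | [] => (0, [])
  | x :: t =>
    if x == h then
      let p := pvRunSplit h t
      (p.1 + 1, p.2)
    else (0, x :: t)

lemma pvRunSplit_length_le (h : String) (t : List String) :
    (pvRunSplit h t).2.length ≤ t.length := by
  induction t with
  | nil => simp [pvRunSplit]
  | cons x t ih =>
    by_cases hx : x == h <;> simp [pvRunSplit, hx] <;> omega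

-- outer while loop over i: recursion on the remaining suffix of the sorted list
def pvScan : List String → Int → Int → Int
  | [], _, ties => ties
  | x :: t, best, ties =>
    let p := pvRunSplit x t
    let run : Int := (p.1 : Int) + 1
    if run > best then pvScan p.2 run 1
    else if run == best then pvScan p.2 best (ties + 1)
    else pvScan p.2 best ties
termination_by l => l.length
decreasing_by all_goals simpa using Nat.lt_succ_of_le (pvRunSplit_length_le x t)

def count_favourite_singers_alt (num_songs : Int) (playlist : List String) : Int :=
  pvScan (PySem.List.sorted playlist (fun x => x) false) 0 0

-- ===== PRECONDITION & SPEC =====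
def Spec_count_favourite_singers (num_songs : Int) (playlist : List String) (out : Int) : Prop := out = count_favourite_singers_alt num_songs playlist
instance (num_songs : Int) (playlist : List String) (out : Int) : Decidable (Spec_count_favourite_singers num_songs playlist out) := by unfold Spec_count_favourite_singers; infer_instance

-- ===== CLAIM (what is proved, stated in full; the proofs are below) =====
def Claim_equal_count_favourite_singers : Prop := ∀ (num_songs : Int) (playlist : List String), Dom_count_favourite_singers num_songs playlist → Spec_count_favourite_singers num_songs playlist (count_favourite_singers num_songs playlist)

-- ===== LEMMAS AND PROOFS =====

-- The loop step of A's port, named so lemmas can talk about it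
def pvStepA (p : PySem.Dict String Int × Int) (singer : String) : PySem.Dict String Int × Int :=
  let c := p.1.getD singer 0 + 1
  (p.1.insert singer c, max p.2 c)

-- the multiset of final counts (one Int per distinct singer, first-occurrence order)
def pvCounts (l : List String) : List Int :=
  (PySem.Set.ofList l).map (fun k => (List.count k l : Int))

-- the run lengths of a list, as B's outer loop visits them
def pvRunLens : List String → List Int
  | [] => []
  | x :: t =>
    let p := pvRunSplit x t
    ((p.1 : Int) + 1) :: pvRunLens p.2
termination_by l => l.length
decreasing_by simpa using Nat.lt_succ_of_le (pvRunSplit_length_le x t)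

-- B's best/ties state machine, abstracted to the list of run lengths
def pvF : List Int → Int → Int → Int
  | [], _, ties => ties
  | r :: rs, best, ties =>
    if r > best then pvF rs r 1
    else if r == best then pvF rs best (ties + 1)
    else pvF rs best ties

lemma pvScan_eq_F (l : List String) : ∀ (best ties : Int),
    pvScan l best ties = pvF (pvRunLens l) best ties := by
  induction l using pvRunLens.induct with
  | case1 => intro best ties; simp [pvScan, pvRunLens, pvF]
  | case2 x t p ih =>
    intro best ties
    rw [pvScan, pvRunLens]
    simp only [pvF]
    split_ifs <;> exact ih _ _

lemma pvF_all_le (rs : List Int) (b : Int) (t : Int) (hub : ∀ r ∈ rs, r ≤ b) :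
    pvF rs b t = t + (rs.count b : Int) := by
  induction rs generalizing t with
  | nil => simp [pvF]
  | cons r rs ih =>
    have hr : r ≤ b := hub r (by simp)
    by_cases hrb : r = b
    · subst hrb
      have hng : ¬ (r > r) := by omega
      simp only [pvF, hng, if_false, beq_self_eq_true, if_true]
      rw [ih _ (fun y hy => hub y (List.mem_cons_of_mem _ hy))]
      rw [List.count_cons_self]
      push_cast
      ring
    · have h1 : ¬ (r > b) := by omega
      have h2 : (r == b) = false := by simp [hrb]
      simp only [pvF, h1, if_false, h2, Bool.false_eq_true, if_false]
      rw [ih _ (fun y hy => hub y (List.mem_cons_of_mem _ hy))]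
      have hcc : List.count b (r :: rs) = List.count b rs := by
        simp [List.count_cons, hrb]
      rw [hcc]

lemma pvF_max (rs : List Int) (b t M : Int) (hM : M ∈ rs)
    (hub : ∀ r ∈ rs, r ≤ M) (hb : b < M) :
    pvF rs b t = (rs.count M : Int) := by
  induction rs generalizing b t with
  | nil => simp at hM
  | cons r rs ih =>
    have hrM : r ≤ M := hub r (by simp)
    by_cases hr : r = M
    · subst hr
      have hgt : r > b := hb
      simp only [pvF, hgt, if_true]
      rw [pvF_all_le rs r 1 (fun y hy => hub y (List.mem_cons_of_mem _ hy))]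
      rw [List.count_cons_self]
      push_cast
      ring
    · have hM' : M ∈ rs := by
        rcases List.mem_cons.1 hM with h | h
        · exact absurd h.symm hr
        · exact h
      have hcnt : List.count M (r :: rs) = List.count M rs := by
        simp [List.count_cons, hr]
      rw [hcnt]
      have hub' : ∀ y ∈ rs, y ≤ M := fun y hy => hub y (List.mem_cons_of_mem _ hy)
      by_cases hgt : r > b
      · simp only [pvF, hgt, if_true]
        exact ih r 1 hM' hub' (by omega)
      · by_cases heq : r = b
        · subst heq
          simp only [pvF, hgt, if_false, beq_self_eq_true, if_true]
          exact ih r (t + 1) hM' hub' hb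
        · have h2 : (r == b) = false := by simp [heq]
          simp only [pvF, hgt, if_false, h2]
          exact ih b t hM' hub' hb

-- pvRunSplit on a sorted (≤-pairwise) list: it strips off exactly the
-- occurrences of the head, which are all at the front
lemma pvRunSplit_spec (x : String) (t : List String)
    (hs : (x :: t).Pairwise (· ≤ ·)) :
    t = List.replicate (pvRunSplit x t).1 x ++ (pvRunSplit x t).2 ∧
      x ∉ (pvRunSplit x t).2 := by
  induction t with
  | nil => simp [pvRunSplit]
  | cons y t ih =>
    by_cases hy : y = x
    · subst hy
      have hs' : (y :: t).Pairwise (· ≤ ·) := hs.sublist (by simp)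
      obtain ⟨h1, h2⟩ := ih hs'
      refine ⟨?_, ?_⟩
      · simp only [pvRunSplit, beq_self_eq_true, if_true]
        simp [List.replicate_succ]
        exact h1
      · simpa [pvRunSplit] using h2
    · have hbeq : (y == x) = false := by simp [hy]
      simp only [pvRunSplit, hbeq, if_false]
      refine ⟨by simp, ?_⟩
      -- x ∉ y :: t : x ≤ y (pairwise head), and if x appeared later then y ≤ x
      rcases List.pairwise_cons.1 hs with ⟨hxle, hyt⟩
      rcases List.pairwise_cons.1 hyt with ⟨hyle, _⟩
      intro hmem
      rcases List.mem_cons.1 hmem with h | h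
      · exact hy h.symm
      · have h1 : x ≤ y := hxle y (by simp)
        have h2 : y ≤ x := hyle x h
        exact hy (le_antisymm h2 h1)

lemma pvDiscard_of_not_mem (s : PySem.Set String) (x : String) (h : x ∉ s) :
    PySem.Set.discard s x = s := by
  simp only [PySem.Set.discard, List.filter_eq_self, Bool.not_eq_eq_eq_not, Bool.not_true,
    beq_eq_false_iff_ne, ne_eq]
  intro a ha hax
  exact h (hax ▸ ha)

lemma pvOfList_replicate_append (n : Nat) (x : String) (rest : List String)
    (h : x ∉ rest) :
    PySem.Set.ofList (List.replicate (n + 1) x ++ rest) = x :: PySem.Set.ofList rest := by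
  induction n with
  | zero =>
    simp only [zero_add, List.replicate_one, List.cons_append, List.nil_append,
      PySem.Set.ofList_cons, List.cons.injEq, true_and]
    exact pvDiscard_of_not_mem _ _ (by simpa [PySem.Set.mem_ofList] using h)
  | succ n ih =>
    have : List.replicate (n + 1 + 1) x ++ rest = x :: (List.replicate (n + 1) x ++ rest) := by
      simp [List.replicate_succ]
    rw [this, PySem.Set.ofList_cons, ih]
    have hd : PySem.Set.discard (x :: PySem.Set.ofList rest) x = PySem.Set.ofList rest := by
      simp only [PySem.Set.discard, BEq.rfl, Bool.not_true, Bool.false_eq_true, not_false_eq_true,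
        List.filter_cons_of_neg, List.filter_eq_self, Bool.not_eq_eq_eq_not, beq_eq_false_iff_ne,
        ne_eq]
      intro a ha hax
      exact h (hax ▸ (PySem.Set.mem_ofList _ _).1 ha)
    rw [hd]

-- on a sorted list, the run lengths ARE the per-singer counts (in order)
lemma pvRunLens_eq_counts (s : List String) (hs : s.Pairwise (· ≤ ·)) :
    pvRunLens s = pvCounts s := by
  induction s using pvRunLens.induct with
  | case1 => simp [pvRunLens, pvCounts, PySem.Set.ofList]
  | case2 x t p ih =>
    obtain ⟨ht, hnm⟩ := pvRunSplit_spec x t hs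
    have hpd : p = pvRunSplit x t := rfl
    rw [← hpd] at ht hnm
    have hrest : p.2.Pairwise (· ≤ ·) := by
      have hsub : p.2.Sublist (x :: t) := by
        rw [ht]
        exact (List.sublist_append_right _ _).cons _
      exact hs.sublist hsub
    have hsplit : x :: t = List.replicate (p.1 + 1) x ++ p.2 := by
      rw [List.replicate_succ, List.cons_append, ← ht]
    rw [pvRunLens]
    rw [← hpd]
    rw [ih hrest]
    unfold pvCounts
    rw [hsplit, pvOfList_replicate_append p.1 x p.2 hnm]
    rw [List.map_cons]
    congr 1
    · have h0 : List.count x p.2 = 0 := List.count_eq_zero.2 hnm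
      simp [List.count_append, List.count_replicate, h0]
    · apply List.map_congr_left
      intro k hk
      have hk2 : k ∈ p.2 := (PySem.Set.mem_ofList _ _).1 hk
      have hkx : k ≠ x := fun h => hnm (h ▸ hk2)
      simp [List.count_append, List.count_replicate, hkx, Ne.symm hkx]

-- ===== A-side machinery (from the A port's fold) =====
lemma pvStepA_fold (l : List String) (d : PySem.Dict String Int) (m : Int) :
    (l.foldl pvStepA (d, m)).1 = l.foldl (fun d s => d.insert s (d.getD s 0 + 1)) d := by
  induction l generalizing d m with
  | nil => rfl
  | cons x t ih => simpa [pvStepA] using ih _ _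

lemma pvFold_fst (l : List String) :
    (l.foldl pvStepA (PySem.Dict.empty, 0)).1 = PySem.Dict.counter l := by
  rw [pvStepA_fold, PySem.Dict.foldl_insert_getD_add_one_eq_counter]

lemma pvCounts_mem {l : List String} {y : Int} :
    y ∈ pvCounts l ↔ ∃ k, k ∈ l ∧ y = (List.count k l : Int) := by
  simp [pvCounts, List.mem_map, PySem.Set.mem_ofList, eq_comm]

lemma pvMax_spec (l : List String) :
    (l = [] ∧ (l.foldl pvStepA (PySem.Dict.empty, 0)).2 = 0) ∨
    ((l.foldl pvStepA (PySem.Dict.empty, 0)).2 ∈ pvCounts l ∧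
      ∀ y ∈ pvCounts l, y ≤ (l.foldl pvStepA (PySem.Dict.empty, 0)).2) := by
  induction l using List.reverseRecOn with
  | nil => exact Or.inl ⟨rfl, rfl⟩
  | append_singleton t x ih =>
    right
    rw [List.foldl_append]
    have hfst := pvFold_fst t
    set p := t.foldl pvStepA (PySem.Dict.empty, 0) with hp
    have hstep : (List.foldl pvStepA p [x]).2 = max p.2 ((List.count x t : Int) + 1) := by
      simp [pvStepA, hfst, PySem.Dict.getD_counter]
    rw [hstep]
    have hcx : List.count x (t ++ [x]) = List.count x t + 1 := by
      simp [List.count_append]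
    have hck : ∀ k, k ≠ x → List.count k (t ++ [x]) = List.count k t := by
      intro k hk; simp [List.count_append, Ne.symm hk]
    rcases ih with ⟨ht, hm⟩ | ⟨hmem, hub⟩
    · subst ht
      constructor
      · rw [pvCounts_mem]
        exact ⟨x, by simp, by simp [hm]⟩
      · intro y hy
        rcases pvCounts_mem.1 hy with ⟨k, hk, rfl⟩
        have : k = x := by simpa using hk
        subst this
        simp [hm]
    · by_cases hle : p.2 ≤ (List.count x t : Int) + 1
      · constructor
        · rw [pvCounts_mem]
          refine ⟨x, by simp, ?_⟩
          rw [hcx]; push_cast; omega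
        · intro y hy
          rcases pvCounts_mem.1 hy with ⟨k, hk, rfl⟩
          by_cases hkx : k = x
          · subst hkx; rw [hcx]; push_cast; omega
          · have hk' : k ∈ t := by
              rcases List.mem_append.1 hk with h | h
              · exact h
              · exact absurd (by simpa using h) hkx
            have := hub _ (pvCounts_mem.2 ⟨k, hk', rfl⟩)
            rw [hck k hkx]
            omega
      · have hmax : max p.2 ((List.count x t : Int) + 1) = p.2 := by omega
        rw [hmax]
        rcases pvCounts_mem.1 hmem with ⟨k₀, hk₀, hkv⟩
        have hk₀x : k₀ ≠ x := by
          intro h; rw [h] at hkv; omega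
        constructor
        · rw [pvCounts_mem]
          exact ⟨k₀, List.mem_append.2 (Or.inl hk₀), by rw [hck k₀ hk₀x]; exact hkv⟩
        · intro y hy
          rcases pvCounts_mem.1 hy with ⟨k, hk, rfl⟩
          by_cases hkx : k = x
          · subst hkx; rw [hcx]; push_cast; omega
          · have hk' : k ∈ t := by
              rcases List.mem_append.1 hk with h | h
              · exact h
              · exact absurd (by simpa using h) hkx
            have := hub _ (pvCounts_mem.2 ⟨k, hk', rfl⟩)
            rw [hck k hkx]; omega

lemma pvValues_counter (l : List String) :
    (PySem.Dict.counter l).values = pvCounts l := by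
  simp [PySem.Dict.values, PySem.Dict.items_counter, pvCounts, List.map_map]

-- counts of the sorted list are a permutation of the counts of the original
lemma pvCounts_sorted_perm (l : List String) :
    (pvCounts (PySem.List.sorted l (fun x => x) false)).Perm (pvCounts l) := by
  set s := PySem.List.sorted l (fun x => x) false with hsdef
  have hperm : s.Perm l := PySem.List.sorted_perm l (fun x => x) false
  have hcount : ∀ k, List.count k s = List.count k l := fun k => hperm.count_eq k
  have h1 : pvCounts s = (PySem.Set.ofList s).map (fun k => (List.count k l : Int)) := by
    unfold pvCounts
    apply List.map_congr_left
    intro k _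
    rw [hcount]
  rw [h1]
  have hof : (PySem.Set.ofList s).Perm (PySem.Set.ofList l) := by
    rw [List.perm_ext_iff_of_nodup (PySem.Set.nodup_ofList s) (PySem.Set.nodup_ofList l)]
    intro a
    simp [PySem.Set.mem_ofList, hperm.mem_iff]
  exact hof.map _

lemma pvCount_sum_ind (rs : List Int) (M : Int) :
    (rs.map (fun c => if c == M then (1 : Int) else 0)).sum = (rs.count M : Int) := by
  induction rs with
  | nil => simp
  | cons r rs ih =>
    rw [List.map_cons, List.sum_cons]
    by_cases h : r = M
    · subst h
      rw [if_pos (by simp), List.count_cons_self, ih]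
      push_cast
      ring
    · rw [if_neg (fun hh => h (beq_iff_eq.mp hh)), zero_add, ih]
      have hcc : List.count M (r :: rs) = List.count M rs := by
        simp [List.count_cons, h]
      rw [hcc]

-- ===== VERDICT (by name: the statement is the Claim_ definition above) =====
theorem count_favourite_singers_spec : Claim_equal_count_favourite_singers := by
  intro num_songs playlist _
  unfold Spec_count_favourite_singers count_favourite_singers_alt
  set s := PySem.List.sorted playlist (fun x => x) false with hsdef
  have hpair : s.Pairwise (· ≤ ·) := by
    simpa using PySem.List.sorted_pairwise playlist (fun x => x)
  rw [pvScan_eq_F, pvRunLens_eq_counts s hpair]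
  show ((List.foldl pvStepA (PySem.Dict.empty, 0) playlist).1.values.map
      (fun count => if count == (List.foldl pvStepA (PySem.Dict.empty, 0) playlist).2 then (1 : Int) else 0)).sum = _
  rw [pvFold_fst, pvValues_counter]
  rcases pvMax_spec playlist with ⟨hnil, hM⟩ | ⟨hmem, hub⟩
  · subst hnil
    rw [show s = [] from by rw [hsdef]; rfl]
    rfl
  · set M := (List.foldl pvStepA (PySem.Dict.empty, 0) playlist).2 with hMdef
    have hperm := pvCounts_sorted_perm playlist
    rw [pvCount_sum_ind]
    have hmem' : M ∈ pvCounts s := hperm.mem_iff.2 hmem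
    have hub' : ∀ y ∈ pvCounts s, y ≤ M := fun y hy => hub y (hperm.subset hy)
    have hMpos : 0 < M := by
      rcases pvCounts_mem.1 hmem with ⟨k, hk, hkv⟩
      have : 1 ≤ List.count k playlist := List.one_le_count_iff.2 hk
      omega
    rw [pvF_max (pvCounts s) 0 0 M hmem' hub' hMpos]
    rw [hperm.count_eq]
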